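-- pv_equiv track=rewrite | github.com/ayaali23/project | main1 (1).py | is_simple_grammar
-- ===== SOURCE A (Python) =====
-- def is_simple_grammar(grammar):
--     for nt, rules in grammar.items():
--         seen_start_symbols = set()  # لتتبع الرموز الأولية التي تبدأ بها القواعد
--         for rule in rules:
--             if rule == '':  # الشرط الثاني: لا يمكن أن تكون القاعدة إبسيلون
--                 return False
--             if not rule[0].islower() and not rule[0].isdigit():  # الشرط الأول: يجب أن تبدأ بـ Terminal
--                 return False
--             if rule[0] in seen_start_symbols:  # الشرط الثالث: لا يمكن تكرار الرموز الأولية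
--                 return False
--             seen_start_symbols.add(rule[0])
--     return True
-- ===== SOURCE B (Python) =====
-- def is_simple_grammar(grammar):
--     for rules in grammar.values():
--         firsts = []
--         for rule in rules:
--             if rule == '':
--                 return False
--             c = rule[0]
--             if not (c.islower() or c.isdigit()):
--                 return False
--             firsts.append(c)
--         firsts.sort()
--         if any(x == y for x, y in zip(firsts, firsts[1:])):
--             return False
--     return True
-- ===== Notes on version B (the rewrite author's own statement) =====
-- stated objective: alternative
-- what changed: Duplicate detection by sort-then-adjacent-scan: per non-terminal B first collects the validated first characters into a list, sorts it, and rejects iff two adjacent sorted entries are equal, instead of A's incremental hash-set membership test interleaved with validation.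
import Mathlib
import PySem

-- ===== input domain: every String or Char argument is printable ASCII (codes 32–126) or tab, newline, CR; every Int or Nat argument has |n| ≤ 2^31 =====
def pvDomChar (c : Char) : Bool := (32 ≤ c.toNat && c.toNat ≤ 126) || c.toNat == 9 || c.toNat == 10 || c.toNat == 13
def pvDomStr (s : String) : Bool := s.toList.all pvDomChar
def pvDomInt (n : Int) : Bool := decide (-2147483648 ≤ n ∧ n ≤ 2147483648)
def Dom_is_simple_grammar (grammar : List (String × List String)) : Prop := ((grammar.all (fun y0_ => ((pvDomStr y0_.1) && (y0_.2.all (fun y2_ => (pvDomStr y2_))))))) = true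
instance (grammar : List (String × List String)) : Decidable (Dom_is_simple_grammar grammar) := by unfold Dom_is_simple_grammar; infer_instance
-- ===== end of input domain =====

-- ===== PORT A =====
-- B replaces A's incremental seen-set with a collect / sort / adjacent-equal scan per
-- non-terminal (objective: alternative algorithm); equivalence is proved on all inputs.

-- first character of a rule (Python rule[0]; only reached on non-empty rules)
def pvFirst (r : String) : Char := r.toList.headD ' '

-- A's inner loop over the rules of one non-terminal, carrying seen_start_symbols
def pvInnerA : List String → PySem.Set Char → Bool
  | [], _ => true
  | rule :: rest, seen =>
    if rule == "" then false
    else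
      let c := pvFirst rule
      if !PySem.Chars.islower c && !PySem.Chars.isdigit c then false
      else if PySem.Set.contains seen c then false
      else pvInnerA rest (PySem.Set.add seen c)

-- A's outer loop over grammar.items() with early return False
def pvOuterA : List (String × List String) → Bool
  | [] => true
  | (_, rules) :: rest =>
    if pvInnerA rules PySem.Set.empty then pvOuterA rest else false

def is_simple_grammar (grammar : List (String × List String)) : Bool :=
  pvOuterA grammar

-- ===== PORT B =====
-- B's collection loop: validate each rule and append its first character to firsts;
-- none = B's early 'return False' during collection
def pvFirstsB : List String → List Char → Option (List Char)
  | [], acc => some acc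
  | rule :: rest, acc =>
    if rule == "" then none
    else
      let c := pvFirst rule
      if !(PySem.Chars.islower c || PySem.Chars.isdigit c) then none
      else pvFirstsB rest (acc ++ [c])

-- per non-terminal: collect, sort, scan adjacent pairs (zip(firsts, firsts[1:]))
def pvGroupB (rules : List String) : Bool :=
  match pvFirstsB rules [] with
  | none => false
  | some firsts =>
    let s := PySem.List.sorted firsts (fun c => c) false
    !((s.zip (s.drop 1)).any (fun p => p.1 == p.2))

def is_simple_grammar_alt (grammar : List (String × List String)) : Bool :=
  grammar.all (fun p => pvGroupB p.2)

-- ===== PRECONDITION & SPEC =====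
def Spec_is_simple_grammar (grammar : List (String × List String)) (out : Bool) : Prop := out = is_simple_grammar_alt grammar
instance (grammar : List (String × List String)) (out : Bool) : Decidable (Spec_is_simple_grammar grammar out) := by unfold Spec_is_simple_grammar; infer_instance

-- ===== CLAIM (what is proved, stated in full; the proofs are below) =====
def Claim_equal_is_simple_grammar : Prop := ∀ (grammar : List (String × List String)), Dom_is_simple_grammar grammar → Spec_is_simple_grammar grammar (is_simple_grammar grammar)

-- ===== LEMMAS AND PROOFS =====

-- a character is a terminal: islower or isdigit (proof-side abbreviation)
def pvTerm (c : Char) : Bool := PySem.Chars.islower c || PySem.Chars.isdigit c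

lemma inner_iff (rules : List String) (seen : PySem.Set Char) :
    pvInnerA rules seen = true ↔
      (∀ r ∈ rules, ¬ r = "" ∧ pvTerm (pvFirst r) = true) ∧
      (rules.map pvFirst).Nodup ∧ ∀ c ∈ rules.map pvFirst, c ∉ seen := by
  induction rules generalizing seen with
  | nil => simp [pvInnerA]
  | cons r rs ih =>
    simp only [pvInnerA, List.map_cons, List.nodup_cons]
    by_cases he : r = ""
    · simp [he]
    · rw [if_neg (by simpa using he)]
      by_cases ht : pvTerm (pvFirst r) = true
      · rw [if_neg (by simp only [pvTerm, Bool.or_eq_true] at ht; rcases ht with h | h <;> simp [h])]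
        by_cases hc : PySem.Set.contains seen (pvFirst r) = true
        · have hmem : pvFirst r ∈ seen := by
            simpa [PySem.Set.contains] using hc
          rw [if_pos hc]
          constructor
          · intro h; simp at h
          · rintro ⟨-, -, h⟩
            exact absurd hmem (h _ (List.mem_cons_self))
        · rw [if_neg hc, ih]
          have hns : pvFirst r ∉ seen := by
            simpa [PySem.Set.contains] using hc
          constructor
          · rintro ⟨h1, h2, h3⟩
            refine ⟨?_, ⟨?_, h2⟩, ?_⟩
            · rintro x hx
              rcases List.mem_cons.mp hx with rfl | hx'
              · exact ⟨he, ht⟩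
              · exact h1 x hx'
            · intro hmem
              have := h3 (pvFirst r) hmem
              rw [PySem.Set.mem_add] at this
              exact this (Or.inr rfl)
            · rintro c hc
              rcases List.mem_cons.mp hc with rfl | hcm
              · exact hns
              · have := h3 c hcm
                rw [PySem.Set.mem_add] at this
                exact fun hmem => this (Or.inl hmem)
          · rintro ⟨h1, ⟨hxm, h2⟩, h3⟩
            refine ⟨fun x hx => h1 x (List.mem_cons_of_mem _ hx), h2, fun c hc' hcm => ?_⟩
            rw [PySem.Set.mem_add] at hcm
            rcases hcm with hcm | rfl
            · exact h3 c (List.mem_cons_of_mem _ hc') hcm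
            · exact hxm hc'
      · rw [if_pos (by simp only [pvTerm, Bool.or_eq_true] at ht; push Not at ht; simp [ht.1, ht.2])]
        constructor
        · intro h; simp at h
        · rintro ⟨h1, -⟩
          exact absurd (h1 r (List.mem_cons_self)).2 ht

-- B's collection loop, characterised
lemma firstsB_some (rules : List String) (acc : List Char)
    (h : ∀ r ∈ rules, ¬ r = "" ∧ pvTerm (pvFirst r) = true) :
    pvFirstsB rules acc = some (acc ++ rules.map pvFirst) := by
  induction rules generalizing acc with
  | nil => simp [pvFirstsB]
  | cons r rs ih =>
    obtain ⟨he, ht⟩ := h r (List.mem_cons_self)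
    simp only [pvFirstsB]
    rw [if_neg (by simpa using he),
      if_neg (by simp only [pvTerm, Bool.or_eq_true] at ht; rcases ht with h' | h' <;> simp [h'])]
    rw [ih _ (fun x hx => h x (List.mem_cons_of_mem _ hx))]
    simp

lemma firstsB_none (rules : List String) (acc : List Char)
    (h : ¬ ∀ r ∈ rules, ¬ r = "" ∧ pvTerm (pvFirst r) = true) :
    pvFirstsB rules acc = none := by
  induction rules generalizing acc with
  | nil => exact absurd (by simp) h
  | cons r rs ih =>
    simp only [pvFirstsB]
    by_cases he : r = ""
    · rw [if_pos (by simpa using he)]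
    · rw [if_neg (by simpa using he)]
      by_cases ht : pvTerm (pvFirst r) = true
      · rw [if_neg (by simp only [pvTerm, Bool.or_eq_true] at ht; rcases ht with h' | h' <;> simp [h'])]
        refine ih _ (fun hall => h ?_)
        rintro x hx
        rcases List.mem_cons.mp hx with rfl | hx'
        · exact ⟨he, ht⟩
        · exact hall x hx'
      · rw [if_pos (by simp only [pvTerm, Bool.or_eq_true] at ht; push Not at ht; simp [ht.1, ht.2])]

-- adjacent-equal scan on a ≤-sorted list detects exactly the duplicates
lemma adj_scan_nodup (s : List Char) (hs : s.Pairwise (fun a b => a ≤ b)) :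
    ((s.zip (s.drop 1)).any (fun p => p.1 == p.2) = false) ↔ s.Nodup := by
  induction s with
  | nil => simp
  | cons a t ih =>
    cases t with
    | nil => simp
    | cons b u =>
      rw [List.pairwise_cons] at hs
      obtain ⟨hle, hs'⟩ := hs
      have hrec := ih hs'
      simp only [List.drop_succ_cons, List.drop_zero, List.zip_cons_cons, List.any_cons,
        Bool.or_eq_false_iff, beq_eq_false_iff_ne, Ne, List.nodup_cons] at *
      constructor
      · rintro ⟨hab, hany⟩
        have hbu := hrec.mp hany
        have halt : a < b := lt_of_le_of_ne (hle b (List.mem_cons_self)) hab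
        refine ⟨?_, hbu⟩
        intro hmem
        rcases List.mem_cons.mp hmem with rfl | hmu
        · exact hab rfl
        · rw [List.pairwise_cons] at hs'
          exact absurd (hs'.1 a hmu) (not_le.mpr halt)
      · rintro ⟨hnm, hnd⟩
        exact ⟨fun hab => hnm (hab ▸ List.mem_cons_self), hrec.mpr hnd⟩

-- per non-terminal, B computes exactly A's inner verdict
lemma group_eq_inner (rules : List String) :
    pvGroupB rules = pvInnerA rules PySem.Set.empty := by
  rw [Bool.eq_iff_iff, inner_iff]
  simp only [pvGroupB]
  by_cases hv : ∀ r ∈ rules, ¬ r = "" ∧ pvTerm (pvFirst r) = true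
  · rw [firstsB_some rules [] hv]
    simp only [List.nil_append]
    set fs := rules.map pvFirst with hfs
    set s := PySem.List.sorted fs (fun c => c) false with hss
    have hperm : s.Perm fs := PySem.List.sorted_perm fs (fun c => c) false
    have hpw : s.Pairwise (fun a b => a ≤ b) := PySem.List.sorted_pairwise fs (fun c => c)
    have := adj_scan_nodup s hpw
    constructor
    · intro h
      refine ⟨hv, ?_, by simp [PySem.Set.empty]⟩
      have : s.Nodup := this.mp (by simpa using h)
      exact hperm.nodup_iff.mp this
    · rintro ⟨-, hnd, -⟩
      have : s.Nodup := hperm.nodup_iff.mpr hnd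
      simpa using (adj_scan_nodup s hpw).mpr this
  · rw [firstsB_none rules [] hv]
    constructor
    · intro h; exact Bool.noConfusion h
    · rintro ⟨h, -, -⟩; exact absurd h hv

lemma outer_eq (grammar : List (String × List String)) :
    pvOuterA grammar = grammar.all (fun p => pvGroupB p.2) := by
  induction grammar with
  | nil => rfl
  | cons p rest ih =>
    obtain ⟨nt, rules⟩ := p
    simp only [pvOuterA, List.all_cons, group_eq_inner, ih]
    cases pvInnerA rules PySem.Set.empty <;> simp

-- ===== VERDICT =====
theorem is_simple_grammar_spec : Claim_equal_is_simple_grammar := by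
  intro grammar _
  unfold Spec_is_simple_grammar is_simple_grammar is_simple_grammar_alt
  exact outer_eq grammar
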